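-- pv_equiv track=rewrite | github.com/kazamazza/pokerai | ml/etl/rangenet/preflop/remapper.py | remap_pair_6max
-- ===== SOURCE A (Python) =====
-- from typing import Tuple
--
-- POS6_ORDER = ["UTG", "HJ", "CO", "BTN", "SB", "BB"]
--
-- POS6_INDEX = {p: i for i, p in enumerate(POS6_ORDER)}
--
-- def remap_pair_6max(ip: str, oop: str, available_pairs: set[Tuple[str,str]]) -> Tuple[str, str, bool]:
--     """
--     Try to remap a 6-max (ip, oop) pair to the closest available pair.
--     - Always preserves OOP.
--     - Only shifts IP to nearest neighbour(s) in POS6_ORDER.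
--     Returns (ip_mapped, oop, substituted_flag).
--     """
--
--     ip = ip.upper(); oop = oop.upper()
--     # if exact pair exists, no remap
--     if (ip, oop) in available_pairs:
--         return ip, oop, False
--
--     if ip not in POS6_INDEX or oop not in POS6_INDEX:
--         return ip, oop, False  # unknown positions, nothing to do
--
--     target_idx = POS6_INDEX[ip]
--     # search outward from target index: ±1, ±2, ...
--     for delta in range(1, len(POS6_ORDER)):
--         for direction in (-1, +1):
--             cand_idx = target_idx + direction * delta
--             if 0 <= cand_idx < len(POS6_ORDER):
--                 cand_ip = POS6_ORDER[cand_idx]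
--                 if (cand_ip, oop) in available_pairs:
--                     return cand_ip, oop, True
--
--     # nothing found
--     return ip, oop, False
-- ===== SOURCE B (Python) =====
-- from typing import Tuple
--
-- POS6_ORDER = ["UTG", "HJ", "CO", "BTN", "SB", "BB"]
--
-- POS6_INDEX = {p: i for i, p in enumerate(POS6_ORDER)}
--
-- def remap_pair_6max(ip: str, oop: str, available_pairs: set[Tuple[str, str]]) -> Tuple[str, str, bool]:
--     """One pass over available_pairs: among pairs whose OOP matches and whose
--     IP is a known position other than ip, keep the one minimising the
--     distance key (left neighbour wins ties); no candidate probing at all."""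
--     ip = ip.upper(); oop = oop.upper()
--     if (ip, oop) in available_pairs:
--         return ip, oop, False
--     if ip not in POS6_INDEX or oop not in POS6_INDEX:
--         return ip, oop, False
--     target = POS6_INDEX[ip]
--     best = None  # (key, position)
--     for p, o in available_pairs:
--         i = POS6_INDEX.get(p)
--         if o != oop or i is None or i == target:
--             continue
--         key = 2 * abs(i - target) + (0 if i < target else 1)
--         if best is None or key < best[0]:
--             best = (key, p)
--     if best is None:
--         return ip, oop, False
--     return best[1], oop, True
-- ===== Notes on version B (the rewrite author's own statement) =====
-- stated objective: alternative
-- what changed: Instead of probing candidate positions outward with nested delta/direction loops and set membership tests, B makes a single argmin pass over available_pairs itself, scoring each matching pair by a distance key (left neighbour before right on ties) and returning the minimum.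
import Mathlib
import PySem

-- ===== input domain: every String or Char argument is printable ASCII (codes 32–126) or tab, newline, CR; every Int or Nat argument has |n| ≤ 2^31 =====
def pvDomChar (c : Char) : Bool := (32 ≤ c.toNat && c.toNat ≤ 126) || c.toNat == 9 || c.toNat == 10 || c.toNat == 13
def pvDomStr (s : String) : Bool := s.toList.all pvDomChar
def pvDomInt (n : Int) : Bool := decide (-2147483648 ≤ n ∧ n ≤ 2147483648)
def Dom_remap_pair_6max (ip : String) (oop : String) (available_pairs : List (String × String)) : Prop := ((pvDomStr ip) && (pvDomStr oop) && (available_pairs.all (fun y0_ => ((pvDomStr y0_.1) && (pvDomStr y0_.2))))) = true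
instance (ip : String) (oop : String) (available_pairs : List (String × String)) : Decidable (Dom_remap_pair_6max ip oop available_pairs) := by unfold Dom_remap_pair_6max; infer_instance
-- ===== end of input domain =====

-- B replaces A's outward candidate probing (nested delta/direction loops with set lookups) by a
-- single argmin pass over available_pairs scored by a distance key (objective: alternative).

-- ===== PORT A =====
def POS6_ORDER : List String := ["UTG", "HJ", "CO", "BTN", "SB", "BB"]

def POS6_INDEX : PySem.Dict String Int :=
  PySem.Dict.ofList [("UTG", 0), ("HJ", 1), ("CO", 2), ("BTN", 3), ("SB", 4), ("BB", 5)]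

-- inner 'for direction in (-1, +1)' loop of A (early return = some)
def remapInnerA (oop : String) (pairs : List (String × String)) (target delta : Int) :
    List Int → Option (String × String × Bool)
  | [] => none
  | dir :: rest =>
    let cand_idx := target + dir * delta
    if 0 ≤ cand_idx ∧ cand_idx < 6 then
      let cand_ip := (PySem.List.pyGet? POS6_ORDER cand_idx).getD ""  -- index guarded in range, cannot be none
      if (cand_ip, oop) ∈ pairs then some (cand_ip, oop, true)
      else remapInnerA oop pairs target delta rest
    else remapInnerA oop pairs target delta rest

-- outer 'for delta in range(1, len(POS6_ORDER))' loop of A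
def remapOuterA (oop : String) (pairs : List (String × String)) (target : Int) :
    List Int → Option (String × String × Bool)
  | [] => none
  | d :: rest =>
    match remapInnerA oop pairs target d [-1, 1] with
    | some r => some r
    | none => remapOuterA oop pairs target rest

def remap_pair_6max (ip : String) (oop : String) (available_pairs : List (String × String)) :
    String × String × Bool :=
  let ip := PySem.Str.upper ip
  let oop := PySem.Str.upper oop
  if (ip, oop) ∈ available_pairs then (ip, oop, false)
  else if !(POS6_INDEX.contains ip) || !(POS6_INDEX.contains oop) then (ip, oop, false)
  else
    let target := POS6_INDEX.getD ip 0  -- key present (guard above), so getD = the Python POS6_INDEX[ip]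
    (remapOuterA oop available_pairs target (PySem.List.pyRange 1 6 1)).getD (ip, oop, false)

-- ===== PORT B =====
-- B's distance key: 2*abs(i - target) + (0 if i < target else 1)
def keyB (target i : Int) : Int :=
  2 * ((i - target).natAbs : Int) + (if i < target then 0 else 1)

-- 'if best is None or key < best[0]: best = (key, p)' — B's update of the running best
def bUpd (best : Option (Int × String)) (k : Int) (p : String) : Option (Int × String) :=
  match best with
  | none => some (k, p)
  | some b => if k < b.1 then some (k, p) else best

-- B's 'for p, o in available_pairs' loop carrying best = None | (key, position)
def bFold (oop : String) (target : Int) : List (String × String) → Option (Int × String) → Option (Int × String)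
  | [], best => best
  | (p, o) :: rest, best =>
    match POS6_INDEX.get? p with
    | none => bFold oop target rest best   -- i is None: continue
    | some i =>
      if o ≠ oop ∨ i = target then bFold oop target rest best   -- continue
      else bFold oop target rest (bUpd best (keyB target i) p)

def remap_pair_6max_alt (ip : String) (oop : String) (available_pairs : List (String × String)) :
    String × String × Bool :=
  let ip := PySem.Str.upper ip
  let oop := PySem.Str.upper oop
  if (ip, oop) ∈ available_pairs then (ip, oop, false)
  else if !(POS6_INDEX.contains ip) || !(POS6_INDEX.contains oop) then (ip, oop, false)
  else
    let target := POS6_INDEX.getD ip 0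
    match bFold oop target available_pairs none with
    | none => (ip, oop, false)
    | some b => (b.2, oop, true)

-- ===== PRECONDITION & SPEC =====
def Spec_remap_pair_6max (ip : String) (oop : String) (available_pairs : List (String × String)) (out : String × String × Bool) : Prop := out = remap_pair_6max_alt ip oop available_pairs
instance (ip : String) (oop : String) (available_pairs : List (String × String)) (out : String × String × Bool) : Decidable (Spec_remap_pair_6max ip oop available_pairs out) := by unfold Spec_remap_pair_6max; infer_instance

-- ===== CLAIM (what is proved, stated in full; the proofs are below) =====
def Claim_equal_remap_pair_6max : Prop := ∀ (ip : String) (oop : String) (available_pairs : List (String × String)), Dom_remap_pair_6max ip oop available_pairs → Spec_remap_pair_6max ip oop available_pairs (remap_pair_6max ip oop available_pairs)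

-- ===== LEMMAS AND PROOFS =====

-- left-preferring minimum on (key, pos) options; bFold's update step is 'minOpt best (some (key, p))'
def minOpt : Option (Int × String) → Option (Int × String) → Option (Int × String)
  | none, b => b
  | some a, none => some a
  | some a, some b => if b.1 < a.1 then some b else some a

lemma minOpt_none_right (a : Option (Int × String)) : minOpt a none = a := by
  cases a <;> rfl

lemma bUpd_minOpt (best : Option (Int × String)) (k : Int) (p : String) :
    bUpd best k p = minOpt best (some (k, p)) := by
  cases best <;> simp [bUpd, minOpt]

lemma minOpt_assoc (a b c : Option (Int × String)) :
    minOpt (minOpt a b) c = minOpt a (minOpt b c) := by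
  cases a with
  | none => rfl
  | some a =>
    cases b with
    | none => rfl
    | some b =>
      cases c with
      | none => rw [minOpt_none_right, minOpt_none_right]
      | some c =>
        by_cases h1 : b.1 < a.1 <;> by_cases h2 : c.1 < b.1 <;>
          simp [minOpt, h1, h2] <;>
          first
            | rfl
            | (exfalso; omega)
            | (intro h; exfalso; omega)

-- the accumulator factors out of B's loop
lemma bFold_minOpt (oop : String) (t : Int) (ps : List (String × String)) :
    ∀ best, bFold oop t ps best = minOpt best (bFold oop t ps none) := by
  induction ps with
  | nil => intro best; simp [bFold, minOpt_none_right]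
  | cons x rest ih =>
    intro best
    obtain ⟨p, o⟩ := x
    simp only [bFold]
    cases hg : POS6_INDEX.get? p with
    | none => exact ih best
    | some i =>
      simp only [bFold, hg]
      by_cases hc : o ≠ oop ∨ i = t
      · simp only [if_pos hc]; exact ih best
      · simp only [if_neg hc]
        rw [ih (bUpd best (keyB t i) p), ih (bUpd none (keyB t i) p), bUpd_minOpt,
          bUpd_minOpt, show minOpt none (some (keyB t i, p)) = some (keyB t i, p) from rfl,
          minOpt_assoc]

-- first-match selector over a fixed (key, position) candidate list
def sel (oop : String) (ps : List (String × String)) : List (Int × String) → Option (Int × String)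
  | [] => none
  | (k, q) :: rest => if (q, oop) ∈ ps then some (k, q) else sel oop ps rest

lemma sel_nil (oop : String) (l : List (Int × String)) : sel oop [] l = none := by
  induction l with
  | nil => rfl
  | cons x rest ih => obtain ⟨k, q⟩ := x; simp [sel, ih]

lemma sel_mem (oop : String) (ps : List (String × String)) (l : List (Int × String)) (v : Int × String)
    (h : sel oop ps l = some v) : v ∈ l := by
  induction l with
  | nil => simp [sel] at h
  | cons x rest ih =>
    obtain ⟨k, q⟩ := x
    simp only [sel] at h
    split_ifs at h with hm
    · cases h; exact List.mem_cons_self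
    · exact List.mem_cons_of_mem _ (ih h)

lemma sel_cons_skip (oop : String) (x : String × String) (ps : List (String × String))
    (l : List (Int × String)) (h : ∀ v ∈ l, (v.2, oop) ≠ x) :
    sel oop (x :: ps) l = sel oop ps l := by
  induction l with
  | nil => rfl
  | cons y rest ih =>
    obtain ⟨k, q⟩ := y
    have hq : ((k, q).2, oop) ≠ x := h (k, q) List.mem_cons_self
    simp only [sel, List.mem_cons, hq, false_or]
    split_ifs with hm
    · rfl
    · exact ih (fun v hv => h v (List.mem_cons_of_mem _ hv))

lemma sel_cons_mem (oop : String) (p0 : String) (k0 : Int) (ps : List (String × String))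
    (l : List (Int × String))
    (hpw : l.Pairwise (fun a b => a.1 < b.1))
    (hmem : (k0, p0) ∈ l)
    (huniq : ∀ v ∈ l, v.2 = p0 → v.1 = k0) :
    sel oop ((p0, oop) :: ps) l = minOpt (some (k0, p0)) (sel oop ps l) := by
  induction l with
  | nil => simp at hmem
  | cons y rest ih =>
    obtain ⟨k, q⟩ := y
    rw [List.pairwise_cons] at hpw
    by_cases hq : q = p0
    · have hk : k = k0 := huniq (k, q) List.mem_cons_self hq
      subst hk; subst hq
      simp only [sel]
      rw [if_pos List.mem_cons_self]
      by_cases hin : (q, oop) ∈ ps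
      · rw [if_pos hin]; simp [minOpt]
      · rw [if_neg hin]
        cases hs : sel oop ps rest with
        | none => simp [minOpt]
        | some v =>
          have hlt : k < v.1 := hpw.1 v (sel_mem oop ps rest v hs)
          simp only [minOpt]
          rw [if_neg (by omega)]
    · have hmem2 : (k0, p0) ∈ rest := by
        rcases List.mem_cons.mp hmem with h | h
        · exact absurd ((Prod.mk.injEq _ _ _ _).mp h).2.symm hq
        · exact h
      have hlt : k < k0 := hpw.1 (k0, p0) hmem2
      have hne : (q, oop) ≠ (p0, oop) := by simp [hq]
      simp only [sel, List.mem_cons, hne, false_or]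
      by_cases hin : (q, oop) ∈ ps
      · rw [if_pos hin, if_pos hin]
        simp only [minOpt]
        rw [if_pos (by omega)]
      · rw [if_neg hin, if_neg hin]
        exact ih hpw.2 hmem2 (fun v hv => huniq v (List.mem_cons_of_mem _ hv))

-- POS6_INDEX facts
lemma POS6_items_get (pr : String × Int) (h : pr ∈ POS6_INDEX.items) :
    POS6_INDEX.get? pr.1 = some pr.2 := by
  fin_cases h <;> decide

lemma POS6_items_fun (pr pr' : String × Int) (h : pr ∈ POS6_INDEX.items)
    (h' : pr' ∈ POS6_INDEX.items) (hq : pr.1 = pr'.1) : pr.2 = pr'.2 := by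
  fin_cases h <;> fin_cases h' <;> simp_all

-- B's loop equals the first-match selector over any candidate table K matching target t
lemma bFold_sel (t : Int) (K : List (Int × String))
    (H1 : K.Pairwise (fun a b => a.1 < b.1))
    (H2 : ∀ pr ∈ POS6_INDEX.items, pr.2 ≠ t → (keyB t pr.2, pr.1) ∈ K)
    (H3 : ∀ v ∈ K, ∃ pr ∈ POS6_INDEX.items, pr.1 = v.2 ∧ pr.2 ≠ t ∧ v.1 = keyB t pr.2) :
    ∀ (ps : List (String × String)) (oop : String), bFold oop t ps none = sel oop ps K := by
  intro ps oop
  induction ps with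
  | nil => simp [bFold, sel_nil]
  | cons x rest ih =>
    obtain ⟨p, o⟩ := x
    cases hg : POS6_INDEX.get? p with
    | none =>
      simp only [bFold, hg]
      have hskip : ∀ v ∈ K, (v.2, oop) ≠ (p, o) := by
        intro v hv heq
        rw [Prod.mk.injEq] at heq
        obtain ⟨pr, hpr, h1, _, _⟩ := H3 v hv
        have hgp := POS6_items_get pr hpr
        rw [h1, heq.1, hg] at hgp
        cases hgp
      rw [ih, sel_cons_skip oop (p, o) rest K hskip]
    | some i =>
      simp only [bFold, hg]
      by_cases hc : o ≠ oop ∨ i = t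
      · rw [if_pos hc]
        have hskip : ∀ v ∈ K, (v.2, oop) ≠ (p, o) := by
          intro v hv heq
          rw [Prod.mk.injEq] at heq
          rcases hc with hc | hc
          · exact hc heq.2.symm
          · obtain ⟨pr, hpr, h1, h2, _⟩ := H3 v hv
            have hgp := POS6_items_get pr hpr
            rw [h1, heq.1, hg] at hgp
            injection hgp with h
            exact h2 (by rw [← h]; exact hc)
        rw [ih, sel_cons_skip oop (p, o) rest K hskip]
      · rw [if_neg hc]
        rw [not_or, not_not] at hc
        obtain ⟨ho, hi⟩ := hc
        subst ho
        have hmem : (keyB t i, p) ∈ K :=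
          H2 (p, i) (PySem.Dict.mem_items_of_get?_eq_some _ hg) hi
        have huniq : ∀ v ∈ K, v.2 = p → v.1 = keyB t i := by
          intro v hv hv2
          obtain ⟨pr, hpr, h1, _, h3⟩ := H3 v hv
          have hpri : pr.2 = i :=
            POS6_items_fun pr (p, i) hpr (PySem.Dict.mem_items_of_get?_eq_some _ hg)
              (by rw [h1, hv2])
          rw [h3, hpri]
        rw [show bUpd none (keyB t i) p = some (keyB t i, p) from rfl, bFold_minOpt, ih,
          sel_cons_mem _ p (keyB t i) rest K H1 hmem huniq]

-- A's outward ±delta search equals the first-match selector over the key-sorted table, per target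
lemma Aside0 (ipU oop : String) (pairs : List (String × String)) :
    (remapOuterA oop pairs 0 (PySem.List.pyRange 1 6 1)).getD (ipU, oop, false)
      = (match sel oop pairs [(3, "HJ"), (5, "CO"), (7, "BTN"), (9, "SB"), (11, "BB")] with
          | none => (ipU, oop, false) | some b => (b.2, oop, true)) := by
  rw [show PySem.List.pyRange 1 6 1 = [1,2,3,4,5] from by decide]
  simp only [remapOuterA, remapInnerA, sel]
  norm_num [PySem.List.pyGet?, PySem.List.pyIdx?, POS6_ORDER]
  split_ifs <;> simp_all

lemma Aside1 (ipU oop : String) (pairs : List (String × String)) :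
    (remapOuterA oop pairs 1 (PySem.List.pyRange 1 6 1)).getD (ipU, oop, false)
      = (match sel oop pairs [(2, "UTG"), (3, "CO"), (5, "BTN"), (7, "SB"), (9, "BB")] with
          | none => (ipU, oop, false) | some b => (b.2, oop, true)) := by
  rw [show PySem.List.pyRange 1 6 1 = [1,2,3,4,5] from by decide]
  simp only [remapOuterA, remapInnerA, sel]
  norm_num [PySem.List.pyGet?, PySem.List.pyIdx?, POS6_ORDER]
  split_ifs <;> simp_all

lemma Aside2 (ipU oop : String) (pairs : List (String × String)) :
    (remapOuterA oop pairs 2 (PySem.List.pyRange 1 6 1)).getD (ipU, oop, false)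
      = (match sel oop pairs [(2, "HJ"), (3, "BTN"), (4, "UTG"), (5, "SB"), (7, "BB")] with
          | none => (ipU, oop, false) | some b => (b.2, oop, true)) := by
  rw [show PySem.List.pyRange 1 6 1 = [1,2,3,4,5] from by decide]
  simp only [remapOuterA, remapInnerA, sel]
  norm_num [PySem.List.pyGet?, PySem.List.pyIdx?, POS6_ORDER]
  split_ifs <;> simp_all

lemma Aside3 (ipU oop : String) (pairs : List (String × String)) :
    (remapOuterA oop pairs 3 (PySem.List.pyRange 1 6 1)).getD (ipU, oop, false)
      = (match sel oop pairs [(2, "CO"), (3, "SB"), (4, "HJ"), (5, "BB"), (6, "UTG")] with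
          | none => (ipU, oop, false) | some b => (b.2, oop, true)) := by
  rw [show PySem.List.pyRange 1 6 1 = [1,2,3,4,5] from by decide]
  simp only [remapOuterA, remapInnerA, sel]
  norm_num [PySem.List.pyGet?, PySem.List.pyIdx?, POS6_ORDER]
  split_ifs <;> simp_all

lemma Aside4 (ipU oop : String) (pairs : List (String × String)) :
    (remapOuterA oop pairs 4 (PySem.List.pyRange 1 6 1)).getD (ipU, oop, false)
      = (match sel oop pairs [(2, "BTN"), (3, "BB"), (4, "CO"), (6, "HJ"), (8, "UTG")] with
          | none => (ipU, oop, false) | some b => (b.2, oop, true)) := by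
  rw [show PySem.List.pyRange 1 6 1 = [1,2,3,4,5] from by decide]
  simp only [remapOuterA, remapInnerA, sel]
  norm_num [PySem.List.pyGet?, PySem.List.pyIdx?, POS6_ORDER]
  split_ifs <;> simp_all

lemma Aside5 (ipU oop : String) (pairs : List (String × String)) :
    (remapOuterA oop pairs 5 (PySem.List.pyRange 1 6 1)).getD (ipU, oop, false)
      = (match sel oop pairs [(2, "SB"), (4, "BTN"), (6, "CO"), (8, "HJ"), (10, "UTG")] with
          | none => (ipU, oop, false) | some b => (b.2, oop, true)) := by
  rw [show PySem.List.pyRange 1 6 1 = [1,2,3,4,5] from by decide]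
  simp only [remapOuterA, remapInnerA, sel]
  norm_num [PySem.List.pyGet?, PySem.List.pyIdx?, POS6_ORDER]
  split_ifs <;> simp_all

lemma contains_POS6 (s : String) (h : POS6_INDEX.contains s = true) :
    s = "UTG" ∨ s = "HJ" ∨ s = "CO" ∨ s = "BTN" ∨ s = "SB" ∨ s = "BB" := by
  simp [PySem.Dict.contains, show POS6_INDEX.items = [("UTG", 0), ("HJ", 1), ("CO", 2), ("BTN", 3), ("SB", 4), ("BB", 5)] from by decide] at h
  tauto

-- ===== VERDICT (by name: the statement is the Claim_ definition above) =====
theorem remap_pair_6max_spec : Claim_equal_remap_pair_6max := by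
  intro ip oop pairs _
  unfold Spec_remap_pair_6max remap_pair_6max remap_pair_6max_alt
  set ipU := PySem.Str.upper ip with hip
  set oopU := PySem.Str.upper oop with hoop
  by_cases h1 : (ipU, oopU) ∈ pairs
  · simp [h1]
  · by_cases h2 : (!(POS6_INDEX.contains ipU) || !(POS6_INDEX.contains oopU)) = true
    · simp [h1, h2]
    · simp only [h1, if_false, h2, Bool.false_eq_true]
      have hc : POS6_INDEX.contains ipU = true := by
        cases hcc : POS6_INDEX.contains ipU <;> simp_all
      rcases contains_POS6 _ hc with h|h|h|h|h|h <;> rw [h]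
      · rw [show POS6_INDEX.getD "UTG" 0 = 0 from by decide,
          bFold_sel 0 [(3, "HJ"), (5, "CO"), (7, "BTN"), (9, "SB"), (11, "BB")]
            (by decide) (by decide) (by decide)]
        exact Aside0 _ _ _
      · rw [show POS6_INDEX.getD "HJ" 0 = 1 from by decide,
          bFold_sel 1 [(2, "UTG"), (3, "CO"), (5, "BTN"), (7, "SB"), (9, "BB")]
            (by decide) (by decide) (by decide)]
        exact Aside1 _ _ _
      · rw [show POS6_INDEX.getD "CO" 0 = 2 from by decide,
          bFold_sel 2 [(2, "HJ"), (3, "BTN"), (4, "UTG"), (5, "SB"), (7, "BB")]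
            (by decide) (by decide) (by decide)]
        exact Aside2 _ _ _
      · rw [show POS6_INDEX.getD "BTN" 0 = 3 from by decide,
          bFold_sel 3 [(2, "CO"), (3, "SB"), (4, "HJ"), (5, "BB"), (6, "UTG")]
            (by decide) (by decide) (by decide)]
        exact Aside3 _ _ _
      · rw [show POS6_INDEX.getD "SB" 0 = 4 from by decide,
          bFold_sel 4 [(2, "BTN"), (3, "BB"), (4, "CO"), (6, "HJ"), (8, "UTG")]
            (by decide) (by decide) (by decide)]
        exact Aside4 _ _ _
      · rw [show POS6_INDEX.getD "BB" 0 = 5 from by decide,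
          bFold_sel 5 [(2, "SB"), (4, "BTN"), (6, "CO"), (8, "HJ"), (10, "UTG")]
            (by decide) (by decide) (by decide)]
        exact Aside5 _ _ _
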